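-- pv_equiv track=rewrite | github.com/minerdev2020/codingTest | 34.py | solution
-- ===== SOURCE A (Python) =====
-- def right(p):
--     cnt = 0
--     for s in p:
--         if s == '(':
--             cnt+=1
--         else:
--             cnt-=1
--         if cnt < 0:
--             return False
--     if cnt == 0:
--         return True
--     else:
--         return False
--
-- def divide_uv(p):
--     cnt = 0
--     check = False
--     u = ''
--     v = ''
--     for s in p:
--         if check:
--             v += s
--         else:
--             u += s
--         if s == '(':
--             cnt += 1
--         else:
--             cnt -= 1
--         if cnt == 0:
--             check = True
--     return u, v
--
-- def solution(p):
--     answer = 0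
--     if p == '':
--         return ''
--     u, v = divide_uv(p)
--
--     if right(u):
--         return u + solution(v)
--     else:
--         answer = '('
--         answer += solution(v)
--         answer += ')'
--
--         temp_u = u[1:-1]
--         for i in temp_u:
--             if i == '(':
--                 answer += ')'
--             else:
--                 answer += '('
--         return answer
-- ===== SOURCE B (Python) =====
-- def solution(p):
--     # Iterative: scan chunk boundaries with a running counter,
--     # collect pieces in a list, keep closing suffixes on a stack; join once.
--     out = []
--     pending = []
--     i = 0
--     n = len(p)
--     while i < n:
--         cnt = 0
--         j = i
--         while j < n:
--             cnt += 1 if p[j] == '(' else -1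
--             j += 1
--             if cnt == 0:
--                 break
--         u = p[i:j]
--         if cnt == 0 and p[i] == '(':
--             out.append(u)
--         else:
--             out.append('(')
--             pending.append(')' + ''.join('(' if c != '(' else ')' for c in u[1:-1]))
--         i = j
--     return ''.join(out + pending[::-1])
-- ===== Notes on version B (the rewrite author's own statement) =====
-- stated objective: alternative
-- what changed: Replaced the recursion that rebuilds strings by concatenation at each level with a single iterative left-to-right chunk scan collecting pieces in a list, keeping closing suffixes on a stack and joining once at the end.
import Mathlib
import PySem

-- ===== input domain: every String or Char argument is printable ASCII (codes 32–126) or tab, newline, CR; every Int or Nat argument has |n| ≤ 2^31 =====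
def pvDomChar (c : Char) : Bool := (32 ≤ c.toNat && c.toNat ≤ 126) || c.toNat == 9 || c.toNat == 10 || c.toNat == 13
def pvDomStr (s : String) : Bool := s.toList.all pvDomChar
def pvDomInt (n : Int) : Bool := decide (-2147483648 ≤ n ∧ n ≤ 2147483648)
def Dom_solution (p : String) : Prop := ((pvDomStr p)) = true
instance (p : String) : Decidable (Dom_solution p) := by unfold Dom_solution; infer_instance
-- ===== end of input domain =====

-- B replaces A's recursion with a single iterative left-to-right chunk scan using a list
-- accumulator and a stack of pending closing suffixes, joined once at the end.

-- ===== PORT A =====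
-- right(p): for-loop over the chars with a counter, early-return False on cnt < 0
def rightGo (p : List Char) (cnt : Int) : Bool :=
  match p with
  | [] => cnt == 0
  | s :: rest =>
    let cnt' := if s = '(' then cnt + 1 else cnt - 1
    if cnt' < 0 then false else rightGo rest cnt'

def rightA (p : List Char) : Bool := rightGo p 0

-- divide_uv(p): for-loop carrying (cnt, check, u, v)
def divideGo (p : List Char) (cnt : Int) (check : Bool) (u v : List Char) :
    List Char × List Char :=
  match p with
  | [] => (u, v)
  | s :: rest =>
    let u' := if check then u else u ++ [s]
    let v' := if check then v ++ [s] else v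
    let cnt' := if s = '(' then cnt + 1 else cnt - 1
    let check' := if cnt' = 0 then true else check
    divideGo rest cnt' check' u' v'

def divideUv (p : List Char) : List Char × List Char := divideGo p 0 false [] []

-- length facts needed for solution's termination (A's recursion is on v, which is shorter)
theorem divideGo_snd_len (p : List Char) : ∀ (cnt : Int) (check : Bool) (u v : List Char),
    (divideGo p cnt check u v).2.length ≤ v.length + p.length := by
  induction p with
  | nil => intro cnt check u v; simp [divideGo]
  | cons s rest ih =>
    intro cnt check u v
    cases check with
    | false =>
      simp only [divideGo, Bool.false_eq_true, if_false, List.length_cons]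
      have h := ih (if s = '(' then cnt + 1 else cnt - 1)
        (if (if s = '(' then cnt + 1 else cnt - 1) = 0 then true else false) (u ++ [s]) v
      omega
    | true =>
      simp only [divideGo, if_true, List.length_cons]
      have h := ih (if s = '(' then cnt + 1 else cnt - 1)
        (if (if s = '(' then cnt + 1 else cnt - 1) = 0 then true else true) u (v ++ [s])
      simp only [List.length_append, List.length_cons, List.length_nil] at h
      omega

theorem divideUv_snd_lt (p : List Char) (h : p ≠ []) :
    (divideUv p).2.length < p.length := by
  cases p with
  | nil => exact absurd rfl h
  | cons s rest =>
    show (divideGo (s :: rest) 0 false [] []).2.length < (s :: rest).length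
    simp only [divideGo, Bool.false_eq_true, if_false]
    have := divideGo_snd_len rest (if s = '(' then (0:Int) + 1 else 0 - 1)
      (if (if s = '(' then (0:Int) + 1 else 0 - 1) = 0 then true else false) ([] ++ [s]) []
    simp only [List.length_nil, List.length_cons] at this ⊢
    omega

-- solution(p), A's recursion; answer building transliterated: the final for-loop over
-- temp_u = u[1:-1] appends one flipped char per step (foldl over the same accumulator)
def solutionL (p : List Char) : List Char :=
  if h : p = [] then []
  else
    let u := (divideUv p).1
    let v := (divideUv p).2
    if rightA u then u ++ solutionL v
    else
      (PySem.List.slice u (some 1) (some (-1))).foldl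
        (fun acc i => acc ++ (if i = '(' then [')'] else ['(']))
        (['('] ++ solutionL v ++ [')'])
termination_by p.length
decreasing_by all_goals exact divideUv_snd_lt p h

def solution (p : String) : String := String.mk (solutionL p.toList)

-- ===== PORT B =====
-- inner while: consume one chunk, returning (u, remaining, final cnt)
def splitChunk (cnt : Int) (p : List Char) : List Char × List Char × Int :=
  match p with
  | [] => ([], [], cnt)
  | c :: rest =>
    let cnt' := if c = '(' then cnt + 1 else cnt - 1
    if cnt' = 0 then ([c], rest, 0)
    else
      let r := splitChunk cnt' rest
      (c :: r.1, r.2.1, r.2.2)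

theorem splitChunk_snd_le (p : List Char) : ∀ (cnt : Int),
    (splitChunk cnt p).2.1.length ≤ p.length := by
  induction p with
  | nil => intro cnt; simp [splitChunk]
  | cons c rest ih =>
    intro cnt
    simp only [splitChunk]
    by_cases h0 : (if c = '(' then cnt + 1 else cnt - 1) = 0
    · simp [h0]
    · have := ih (if c = '(' then cnt + 1 else cnt - 1)
      simp only [h0, if_false, List.length_cons]
      omega

theorem splitChunk_snd_len (p : List Char) (cnt : Int) (h : p ≠ []) :
    (splitChunk cnt p).2.1.length < p.length := by
  cases p with
  | nil => exact absurd rfl h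
  | cons c rest =>
    simp only [splitChunk]
    by_cases h0 : (if c = '(' then cnt + 1 else cnt - 1) = 0
    · simp [h0]
    · have := splitChunk_snd_le rest (if c = '(' then cnt + 1 else cnt - 1)
      simp only [h0, if_false, List.length_cons]
      omega

-- outer while: out = collected pieces, pending = stack of closing suffixes
def loopB (p : List Char) (out pending : List (List Char)) : List Char :=
  match h : p with
  | [] => (out ++ pending.reverse).flatten
  | c :: _ =>
    let r := splitChunk 0 p
    if r.2.2 = 0 ∧ c = '(' then
      loopB r.2.1 (out ++ [r.1]) pending
    else
      loopB r.2.1 (out ++ [['(']])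
        (pending ++ [')' :: (PySem.List.slice r.1 (some 1) (some (-1))).map
          (fun ch => if ch ≠ '(' then '(' else ')')])
termination_by p.length
decreasing_by all_goals · subst h; exact splitChunk_snd_len _ 0 (by simp)

def solution_alt (p : String) : String := String.mk (loopB p.toList [] [])

-- ===== PRECONDITION & SPEC =====
def Spec_solution (p : String) (out : String) : Prop := out = solution_alt p
instance (p : String) (out : String) : Decidable (Spec_solution p out) := by unfold Spec_solution; infer_instance

-- ===== CLAIM (what is proved, stated in full; the proofs are below) =====
def Claim_equal_solution : Prop := ∀ (p : String), Dom_solution p → Spec_solution p (solution p)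

-- ===== LEMMAS AND PROOFS =====

-- once check = true, everything remaining is appended to v
theorem divideGo_true (p : List Char) : ∀ (cnt : Int) (u v : List Char),
    divideGo p cnt true u v = (u, v ++ p) := by
  induction p with
  | nil => intro cnt u v; simp [divideGo]
  | cons s rest ih => intro cnt u v; simp [divideGo, ih]

-- divide_uv is exactly one splitChunk step
theorem divideGo_false (p : List Char) : ∀ (cnt : Int) (u : List Char),
    divideGo p cnt false u [] = (u ++ (splitChunk cnt p).1, (splitChunk cnt p).2.1) := by
  induction p with
  | nil => intro cnt u; simp [divideGo, splitChunk]
  | cons s rest ih =>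
    intro cnt u
    simp only [divideGo, splitChunk, if_false, Bool.false_eq_true]
    by_cases h : (if s = '(' then cnt + 1 else cnt - 1) = 0
    · simp [h, divideGo_true]
    · simp [h, ih]

theorem divideUv_eq_splitChunk (p : List Char) :
    divideUv p = ((splitChunk 0 p).1, (splitChunk 0 p).2.1) := by
  simpa using divideGo_false p 0 []

-- rightA on a chunk cut at the first zero of the counter, when the counter stays positive
theorem rightGo_splitChunk (p : List Char) : ∀ (cnt : Int), 0 < cnt →
    rightGo (splitChunk cnt p).1 cnt = ((splitChunk cnt p).2.2 == 0) := by
  induction p with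
  | nil => intro cnt h; simp [splitChunk, rightGo]
  | cons c rest ih =>
    intro cnt h
    simp only [splitChunk]
    by_cases h0 : (if c = '(' then cnt + 1 else cnt - 1) = 0
    · simp [h0, rightGo]
    · have hpos : 0 < (if c = '(' then cnt + 1 else cnt - 1) := by
        split at h0 <;> split <;> omega
      simp only [h0, if_false]
      simp only [rightGo]
      rw [if_neg (by omega)]
      exact ih _ hpos

-- rightA of the first chunk ⟺ (counter returned to zero ∧ first char is '(')
theorem rightA_chunk (c : Char) (rest : List Char) :
    rightA (splitChunk 0 (c :: rest)).1 =
      (((splitChunk 0 (c :: rest)).2.2 == 0) && (c == '(')) := by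
  simp only [splitChunk]
  by_cases hc : c = '('
  · simp only [hc, if_true]
    by_cases h0 : (0:Int) + 1 = 0
    · exact absurd h0 (by norm_num)
    · simp only [h0, if_false]
      simp only [rightA, rightGo, reduceIte]
      rw [if_neg (by omega : ¬((0:Int) + 1 < 0))]
      simpa using rightGo_splitChunk rest (0 + 1) (by omega)
  · have h0 : (0:Int) - 1 ≠ 0 := by omega
    simp only [hc, if_false, h0, rightA, rightGo]
    rw [if_pos (by omega)]
    simp [hc]

-- the accumulated flip loop is the flipped map appended to the accumulator
theorem flip_fold (l acc : List Char) :
    l.foldl (fun acc i => acc ++ (if i = '(' then [')'] else ['('])) acc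
      = acc ++ l.map (fun ch => if ch ≠ '(' then '(' else ')') := by
  rw [show (fun acc i => acc ++ (if i = '(' then [')'] else ['('])) =
      (fun acc (i : Char) => acc ++ [if i ≠ '(' then '(' else ')']) from by
    funext a i; by_cases h : i = '(' <;> simp [h]]
  exact PySem.List.foldl_append_singleton_eq_map _ l acc

-- main invariant: the iterative loop equals the recursion plus the accumulators
theorem loopB_eq (n : Nat) : ∀ (p : List Char), p.length ≤ n → ∀ (out pending : List (List Char)),
    loopB p out pending = out.flatten ++ solutionL p ++ pending.reverse.flatten := by
  induction n with
  | zero =>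
    intro p hp out pending
    have : p = [] := List.eq_nil_of_length_eq_zero (by omega)
    subst this
    simp [loopB, solutionL]
  | succ n ih =>
    intro p hp out pending
    cases p with
    | nil => simp [loopB, solutionL]
    | cons c rest =>
      have hne : (c :: rest) ≠ [] := by simp
      have hvlen : (splitChunk 0 (c :: rest)).2.1.length ≤ n := by
        have := splitChunk_snd_len (c :: rest) 0 hne
        simp at this hp; omega
      rw [loopB]
      have hsol : solutionL (c :: rest) =
          (if rightA (splitChunk 0 (c :: rest)).1 then
            (splitChunk 0 (c :: rest)).1 ++ solutionL (splitChunk 0 (c :: rest)).2.1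
          else
            (PySem.List.slice (splitChunk 0 (c :: rest)).1 (some 1) (some (-1))).foldl
              (fun acc i => acc ++ (if i = '(' then [')'] else ['(']))
              (['('] ++ solutionL (splitChunk 0 (c :: rest)).2.1 ++ [')'])) := by
        rw [solutionL]
        simp only [hne, divideUv_eq_splitChunk]
        rfl
      by_cases hb : (splitChunk 0 (c :: rest)).2.2 = 0 ∧ c = '('
      · obtain ⟨hb1, hb2⟩ := hb
        rw [if_pos ⟨hb1, hb2⟩, ih _ hvlen]
        subst hb2
        rw [hsol, if_pos (by rw [rightA_chunk]; simp [hb1])]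
        simp
      · rw [if_neg hb, ih _ hvlen]
        rw [hsol, if_neg (by rw [rightA_chunk]; simp only [Bool.and_eq_true, beq_iff_eq]; tauto)]
        rw [flip_fold]
        simp [List.flatten_append]
  
theorem loopB_nil_nil (p : List Char) : loopB p [] [] = solutionL p := by
  simpa using loopB_eq p.length p le_rfl [] []

-- ===== VERDICT (by name: the statement is the Claim_ definition above) =====
theorem solution_spec : Claim_equal_solution := by
  intro p _
  unfold Spec_solution solution solution_alt
  rw [loopB_nil_nil]
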